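-- pv_equiv track=rewrite | github.com/l11ama/duetable | duetable/src/melody_markov_chain.py | find_all_after
-- ===== SOURCE A (Python) =====
-- from typing import List, Set
--
-- def find_all_after(state_note: int, melody_score: List[tuple[str, int, int, int]]) -> List[tuple[str, int, int, int]]:
--     all = []
--     for idx, note in enumerate(melody_score):
--         midi_name, midi_no, midi_velocity, midi_duration = note
--         if midi_no == state_note:
--             if idx + 1 == len(melody_score):
--                 all.append(melody_score[0])
--             else:
--                 all.append(melody_score[idx + 1])
--     return all
-- ===== SOURCE B (Python) =====
-- def find_all_after(state_note, melody_score):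
--     if not melody_score:
--         return []
--     first = melody_score[0]
--
--     def chase(cur, rest):
--         # last element wraps to the saved first; otherwise successor is rest's head
--         if not rest:
--             return [first] if cur[1] == state_note else []
--         nxt = rest[0]
--         tail = chase(nxt, rest[1:])
--         return [nxt] + tail if cur[1] == state_note else tail
--
--     return chase(first, melody_score[1:])
-- ===== Notes on version B (the rewrite author's own statement) =====
-- stated objective: alternative
-- what changed: B replaces A's indexed loop (with an idx+1==len wrap branch and list indexing) by structural recursion on the list: each call sees the current note and the remaining tail, takes the successor from the tail's head, and the base case returns the saved first element for the wrap, so no index or length arithmetic remains.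
import Mathlib
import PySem

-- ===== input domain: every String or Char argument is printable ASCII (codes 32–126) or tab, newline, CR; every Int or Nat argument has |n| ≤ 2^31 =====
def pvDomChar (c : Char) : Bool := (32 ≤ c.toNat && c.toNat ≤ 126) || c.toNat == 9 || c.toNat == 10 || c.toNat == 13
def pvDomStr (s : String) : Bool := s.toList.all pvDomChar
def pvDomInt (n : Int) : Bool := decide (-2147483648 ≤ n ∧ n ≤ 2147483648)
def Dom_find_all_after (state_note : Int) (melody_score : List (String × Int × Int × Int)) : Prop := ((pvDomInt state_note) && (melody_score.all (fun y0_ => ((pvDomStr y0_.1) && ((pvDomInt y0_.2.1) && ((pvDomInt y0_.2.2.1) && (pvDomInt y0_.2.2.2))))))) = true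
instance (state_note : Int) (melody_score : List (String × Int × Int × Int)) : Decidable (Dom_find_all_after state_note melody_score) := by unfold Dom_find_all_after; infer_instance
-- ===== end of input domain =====

-- B is a structural recursion: each step reads the successor off the tail's head and the
-- base case returns the saved first element for the wrap, so A's index and length test vanish (objective: alternative).

-- ===== PORT A =====
def find_all_after (state_note : Int) (melody_score : List (String × Int × Int × Int)) : List (String × Int × Int × Int) :=
  (PySem.List.enumerate melody_score 0).foldl
    (fun all p =>
      let idx := p.1
      let note := p.2
      let midi_no := note.2.1
      if midi_no == state_note then
        if idx + 1 == (melody_score.length : Int) then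
          all ++ [PySem.List.pyGetD melody_score 0 ("", 0, 0, 0)]
        else
          all ++ [PySem.List.pyGetD melody_score (idx + 1) ("", 0, 0, 0)]
      else all) []

-- ===== PORT B =====
-- helper 'chase' of Source B: 'first' is the saved head used by the wrap base case
def pvChase (state_note : Int) (first : String × Int × Int × Int) :
    (String × Int × Int × Int) → List (String × Int × Int × Int) → List (String × Int × Int × Int)
  | cur, [] => if cur.2.1 == state_note then [first] else []
  | cur, nxt :: rest =>
      let tail := pvChase state_note first nxt rest
      if cur.2.1 == state_note then nxt :: tail else tail

def find_all_after_alt (state_note : Int) (melody_score : List (String × Int × Int × Int)) : List (String × Int × Int × Int) :=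
  match melody_score with
  | [] => []
  | first :: rest => pvChase state_note first first rest

-- ===== PRECONDITION & SPEC =====
def Spec_find_all_after (state_note : Int) (melody_score : List (String × Int × Int × Int)) (out : List (String × Int × Int × Int)) : Prop := out = find_all_after_alt state_note melody_score
instance (state_note : Int) (melody_score : List (String × Int × Int × Int)) (out : List (String × Int × Int × Int)) : Decidable (Spec_find_all_after state_note melody_score out) := by unfold Spec_find_all_after; infer_instance

-- ===== CLAIM =====
def Claim_equal_find_all_after : Prop := ∀ (state_note : Int) (melody_score : List (String × Int × Int × Int)), Dom_find_all_after state_note melody_score → Spec_find_all_after state_note melody_score (find_all_after state_note melody_score)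

-- ===== LEMMAS AND PROOFS =====

-- filterMap with an 'if … then some f x else none' body is a filter followed by a map
theorem filterMap_ite_some {α β : Type} (p : α → Bool) (f : α → β) (l : List α) :
    l.filterMap (fun x => if p x then some (f x) else none)
      = (l.filter p).map f := by
  induction l with
  | nil => rfl
  | cons x xs ih =>
    by_cases h : p x <;> simp [h, ih]

-- pvChase computes the filterMap of the zip with the wrap-successor sequence
theorem pvChase_eq_zip (state_note : Int) (w : String × Int × Int × Int)
    (cur : String × Int × Int × Int) (rest : List (String × Int × Int × Int)) :
    pvChase state_note w cur rest
      = ((cur :: rest).zip (rest ++ [w])).filterMap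
          (fun p => if p.1.2.1 == state_note then some p.2 else none) := by
  induction rest generalizing cur with
  | nil => by_cases h : cur.2.1 = state_note <;> simp [pvChase, h]
  | cons nxt rs ih =>
    by_cases h : cur.2.1 = state_note <;>
      simp [pvChase, h, ih nxt, List.zip_cons_cons]

-- the rotated zip has exactly the (note, wrap-successor) pairs A indexes out
theorem zip_rot_eq_map_enumerate (ms : List (String × Int × Int × Int)) :
    ms.zip (ms.drop 1 ++ ms.take 1)
      = (PySem.List.enumerate ms 0).map
          (fun p => (p.2,
            if p.1 + 1 == (ms.length : Int) then PySem.List.pyGetD ms 0 ("", 0, 0, 0)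
            else PySem.List.pyGetD ms (p.1 + 1) ("", 0, 0, 0))) := by
  apply List.ext_getElem
  · simp [PySem.List.length_enumerate, List.length_zip, List.length_take]
    omega
  · intro k h1 h2
    have hk : k < ms.length := by
      simp only [List.length_map, PySem.List.length_enumerate] at h2
      exact h2
    have hlen : 1 ≤ ms.length := by omega
    simp only [List.getElem_zip, List.getElem_map, PySem.List.getElem_enumerate, zero_add]
    have hrot : (ms.drop 1 ++ ms.take 1)[k]'(by simp [List.length_append]; omega)
        = if k + 1 = ms.length then PySem.List.pyGetD ms 0 ("", 0, 0, 0)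
          else PySem.List.pyGetD ms ((k : Int) + 1) ("", 0, 0, 0) := by
      by_cases hw : k + 1 = ms.length
      · have hd : k ≥ (ms.drop 1).length := by simp; omega
        rw [List.getElem_append_right hd, if_pos hw]
        simp [PySem.List.pyGetD_zero, List.getD_eq_getElem?_getD,
          List.getElem?_eq_getElem (show 0 < ms.length by omega)]
        have h0 : k - (ms.length - 1) = 0 := by omega
        simp only [h0]
      · have hd : k < (ms.drop 1).length := by simp; omega
        rw [List.getElem_append_left hd, if_neg hw]
        have hknat : ((k : Int) + 1) = ((k + 1 : Nat) : Int) := by push_cast; ring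
        rw [hknat, PySem.List.pyGetD_natCast]
        simp [List.getD_eq_getElem?_getD,
          List.getElem?_eq_getElem (show k + 1 < ms.length by omega)]
    have hcast : (((k : Int) + 1 == (ms.length : Int))) = decide (k + 1 = ms.length) := by
      rw [beq_eq_decide]
      simp only [decide_eq_decide]
      omega
    rw [hrot, hcast]
    by_cases hw : k + 1 = ms.length <;> simp [hw]

-- ===== VERDICT =====
theorem find_all_after_spec : Claim_equal_find_all_after := by
  intro state_note ms _
  unfold Spec_find_all_after find_all_after
  have hbody : (fun (all : List (String × Int × Int × Int)) (p : Int × (String × Int × Int × Int)) =>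
      let idx := p.1
      let note := p.2
      let midi_no := note.2.1
      if midi_no == state_note then
        if idx + 1 == (ms.length : Int) then
          all ++ [PySem.List.pyGetD ms 0 ("", 0, 0, 0)]
        else
          all ++ [PySem.List.pyGetD ms (idx + 1) ("", 0, 0, 0)]
      else all)
      = (fun all p =>
        if p.2.2.1 == state_note then
          all ++ [if p.1 + 1 == (ms.length : Int) then PySem.List.pyGetD ms 0 ("", 0, 0, 0)
                  else PySem.List.pyGetD ms (p.1 + 1) ("", 0, 0, 0)]
        else all) := by
    funext all p
    by_cases h1 : p.2.2.1 == state_note <;> by_cases h2 : p.1 + 1 == (ms.length : Int) <;>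
      simp [h1, h2]
  rw [hbody, PySem.List.foldl_append_if]
  match ms with
  | [] => rfl
  | first :: rest =>
    rw [show find_all_after_alt state_note (first :: rest)
          = pvChase state_note first first rest from rfl, pvChase_eq_zip]
    have hrot : rest ++ [first] = (first :: rest).drop 1 ++ (first :: rest).take 1 := by simp
    rw [hrot, zip_rot_eq_map_enumerate, filterMap_ite_some]
    simp only [List.filter_map, List.map_map, List.nil_append]
    simp [Function.comp_def]
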